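-- pv_equiv track=rewrite | github.com/LyingScholar/GCIS123 | unit-13-LyingScholar/practise13.py | get_divisible_numbers
-- ===== SOURCE A (Python) =====
-- def get_divisible_numbers(n, results=None):
--     if results is None:
--         results = []
--
--     if n < 3:
--         return results
--
--     if (n % 3 == 0 or n % 5 == 0) and not (n % 3 == 0 and n % 5 == 0):
--         results.append(n)
--
--     return get_divisible_numbers(n-1, results)
-- ===== SOURCE B (Python) =====
-- def get_divisible_numbers(n, results=None):
--     if results is None:
--         results = []
--     for i in range(n, 2, -1):
--         if (i % 3 == 0) != (i % 5 == 0):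
--             results.append(i)
--     return results
-- ===== Notes on version B (the rewrite author's own statement) =====
-- stated objective: simpler
-- what changed: Replaces the tail recursion (one stack frame per step from n down to 3) with a single descending for-loop over range(n,2,-1), testing 'exactly one of 3,5 divides' as a boolean inequality; the same caller-supplied list is mutated and returned. Pre_ excludes n >= 1000, where A raises RecursionError (B still returns there).
import Mathlib
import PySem

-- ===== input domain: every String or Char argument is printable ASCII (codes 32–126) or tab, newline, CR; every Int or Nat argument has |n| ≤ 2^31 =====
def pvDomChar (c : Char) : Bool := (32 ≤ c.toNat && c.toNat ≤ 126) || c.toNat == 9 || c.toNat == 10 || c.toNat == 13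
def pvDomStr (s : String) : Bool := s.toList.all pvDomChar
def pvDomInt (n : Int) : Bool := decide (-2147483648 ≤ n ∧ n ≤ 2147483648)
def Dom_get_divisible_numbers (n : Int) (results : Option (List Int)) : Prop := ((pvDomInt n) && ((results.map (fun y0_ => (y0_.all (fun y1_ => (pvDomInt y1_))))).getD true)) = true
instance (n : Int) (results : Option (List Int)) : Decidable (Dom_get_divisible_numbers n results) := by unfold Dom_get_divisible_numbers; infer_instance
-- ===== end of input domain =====

-- B: the same descending sequence built by a for-loop over range(n,2,-1) instead of tail recursion (simpler; return-value and mutation behaviour identical).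
-- ===== PORT A =====
-- recursive worker: the body of A after the 'results is None' default is resolved
def gdnGo (n : Int) (results : List Int) : List Int :=
  if n < 3 then results
  else
    gdnGo (n - 1)
      (if ((n % 3 == 0 || n % 5 == 0) && !(n % 3 == 0 && n % 5 == 0)) then results ++ [n]
       else results)
termination_by (n - 2).toNat
decreasing_by omega

def get_divisible_numbers (n : Int) (results : Option (List Int)) : List Int :=
  gdnGo n (results.getD [])

-- ===== PORT B =====
def get_divisible_numbers_alt (n : Int) (results : Option (List Int)) : List Int :=
  (PySem.List.pyRange n 2 (-1)).foldl
    (fun acc i => if ((i % 3 == 0) != (i % 5 == 0)) then acc ++ [i] else acc)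
    (results.getD [])

-- ===== PRECONDITION & SPEC =====
-- Pre_ excludes n >= 1000, on which A's recursion (one frame per step down to 3) exceeds
-- CPython's default recursion limit and raises RecursionError; A returns normally for n <= 999.
def Pre_get_divisible_numbers (n : Int) (results : Option (List Int)) : Prop := n ≤ 999
instance (n : Int) (results : Option (List Int)) : Decidable (Pre_get_divisible_numbers n results) := by unfold Pre_get_divisible_numbers; infer_instance
def pvWitness_get_divisible_numbers : Int × Option (List Int) := (20, some [7, 1])

def Spec_get_divisible_numbers (n : Int) (results : Option (List Int)) (out : List Int) : Prop := out = get_divisible_numbers_alt n results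
instance (n : Int) (results : Option (List Int)) (out : List Int) : Decidable (Spec_get_divisible_numbers n results out) := by unfold Spec_get_divisible_numbers; infer_instance

-- ===== CLAIM (what is proved, stated in full; the proofs are below) =====
def Claim_equal_get_divisible_numbers : Prop := ∀ (n : Int) (results : Option (List Int)), Dom_get_divisible_numbers n results → Pre_get_divisible_numbers n results → Spec_get_divisible_numbers n results (get_divisible_numbers n results)

-- ===== LEMMAS AND PROOFS =====

-- ===== VERDICT (by name: the statement is the Claim_ definition above) =====
-- the recursive worker equals B's fold over the countdown range
theorem gdnGo_eq_foldl (k : Nat) : ∀ (n : Int), (n - 2).toNat = k → ∀ (r : List Int),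
    gdnGo n r = (PySem.List.pyRange n 2 (-1)).foldl
      (fun acc i => if ((i % 3 == 0) != (i % 5 == 0)) then acc ++ [i] else acc) r := by
  induction k with
  | zero =>
    intro n hk r
    have hle : n ≤ 2 := by omega
    rw [PySem.List.pyRange_neg_one_eq_nil hle]
    unfold gdnGo
    simp [show n < 3 by omega]
  | succ k ih =>
    intro n hk r
    have h2 : (2 : Int) < n := by omega
    rw [PySem.List.pyRange_neg_one_cons h2]
    unfold gdnGo
    rw [if_neg (by omega : ¬ n < 3)]
    rw [ih (n - 1) (by omega)]
    simp only [List.foldl_cons]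
    have hc : ((n % 3 == 0 || n % 5 == 0) && !(n % 3 == 0 && n % 5 == 0))
        = ((n % 3 == 0) != (n % 5 == 0)) := by
      cases (n % 3 == 0) <;> cases (n % 5 == 0) <;> rfl
    rw [hc]

theorem get_divisible_numbers_spec : Claim_equal_get_divisible_numbers := by
  intro n results _ _
  unfold Spec_get_divisible_numbers get_divisible_numbers get_divisible_numbers_alt
  exact gdnGo_eq_foldl (n - 2).toNat n rfl _
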